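-- pv_equiv track=rewrite | github.com/poke-ai-sit/poke-ai | bridge/src/pokelive_bridge/pokemon_text.py | sanitize_dialog_text
-- ===== SOURCE A (Python) =====
-- def sanitize_dialog_text(text: str) -> str:
--     sanitized: list[str] = []
--
--     for char in text:
--         if char.isascii() and (char.isalnum() or char == " "):
--             sanitized.append(char)
--         elif char == ".":
--             sanitized.append(char)
--         elif char in {"!", "?", ",", ":", ";"}:
--             sanitized.append("." if char in {"!", "?"} else " ")
--         elif char in {"\n", "\r", "\t", "-", "/", "_"}:
--             sanitized.append(" ")
--         elif char in {"'", '"', "`"}: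
--             continue
--         else:
--             sanitized.append(" ")
--
--     return " ".join("".join(sanitized).split())
-- ===== SOURCE B (Python) =====
-- def sanitize_dialog_text(text: str) -> str:
--     # Single pass building the output words directly: quotes vanish (no word
--     # break), '!'/'?' become '.', alnum/'.' extend the current word, anything
--     # else ends the current word. No intermediate sanitized string, no split().
--     words: list[str] = []
--     cur: list[str] = []
--     for ch in text:
--         if ch in "'\"`":
--             continue
--         if ch in "!?":
--             ch = "."
--         if ch == "." or (ch.isascii() and ch.isalnum()):
--             cur.append(ch)
--         elif cur:
--             words.append("".join(cur))
--             cur = []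
--     if cur:
--         words.append("".join(cur))
--     return " ".join(words)
-- ===== Notes on version B (the rewrite author's own statement) =====
-- stated objective: alternative
-- what changed: Replaced A's two-stage pipeline (map every char to a sanitized char list, then re-split the joined string on whitespace and re-join) with a single-pass finite-state word builder that emits completed words directly: quotes are skipped without breaking a word, '!'/'?' become '.', alnum/'.' extend the current word, and any other character terminates it; no intermediate sanitized string and no split() pass exist.
import Mathlib
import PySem

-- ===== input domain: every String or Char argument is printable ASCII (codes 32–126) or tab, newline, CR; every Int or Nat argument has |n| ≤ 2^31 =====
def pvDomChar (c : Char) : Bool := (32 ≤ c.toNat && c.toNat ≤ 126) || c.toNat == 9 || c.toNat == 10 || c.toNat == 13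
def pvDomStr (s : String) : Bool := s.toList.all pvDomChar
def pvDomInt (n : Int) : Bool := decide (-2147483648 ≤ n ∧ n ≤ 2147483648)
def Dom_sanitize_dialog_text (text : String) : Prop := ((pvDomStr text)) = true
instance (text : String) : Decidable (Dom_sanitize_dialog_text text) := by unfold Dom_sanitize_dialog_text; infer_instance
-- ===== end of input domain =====

-- ===== PORT A =====
-- B replaces A's map-then-split/join pipeline with a single-pass word builder (objective: alternative decomposition, not measured faster).
-- c.isascii() ported by hand as c.toNat ≤ 127 (exact: Python's isascii tests the code point < 128).
def pvStepA (acc : List Char) (c : Char) : List Char :=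
  if (decide (c.toNat ≤ 127) && (PySem.Chars.isalnum c || c == ' ')) then acc ++ [c]
  else if c == '.' then acc ++ [c]
  else if (c == '!' || c == '?' || c == ',' || c == ':' || c == ';') then
    acc ++ [if c == '!' || c == '?' then '.' else ' ']
  else if (c == '\n' || c == '\r' || c == '\t' || c == '-' || c == '/' || c == '_') then acc ++ [' ']
  else if (c == '\'' || c == '"' || c == '`') then acc
  else acc ++ [' ']

def sanitize_dialog_text (text : String) : String :=
  let sanitized : List Char := text.toList.foldl pvStepA []
  PySem.Str.join " " (PySem.Str.split₀ (String.ofList sanitized))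

-- ===== PORT B =====
-- the loop body of Source B: state = (words so far, current word)
def pvStepB (st : List String × List Char) (c : Char) : List String × List Char :=
  if c == '\'' || c == '"' || c == '`' then st
  else
    let c' := if c == '!' || c == '?' then '.' else c
    if c' == '.' || (decide (c'.toNat ≤ 127) && PySem.Chars.isalnum c') then (st.1, st.2 ++ [c'])
    else if !st.2.isEmpty then (st.1 ++ [String.ofList st.2], ([] : List Char))
    else st

def sanitize_dialog_text_alt (text : String) : String :=
  let st := text.toList.foldl pvStepB ([], [])
  let words := if !st.2.isEmpty then st.1 ++ [String.ofList st.2] else st.1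
  PySem.Str.join " " words

-- ===== PRECONDITION & SPEC =====
def Spec_sanitize_dialog_text (text : String) (out : String) : Prop := out = sanitize_dialog_text_alt text
instance (text : String) (out : String) : Decidable (Spec_sanitize_dialog_text text out) := by unfold Spec_sanitize_dialog_text; infer_instance

-- ===== CLAIM (what is proved, stated in full; the proofs are below) =====
def Claim_equal_sanitize_dialog_text : Prop := ∀ (text : String), Dom_sanitize_dialog_text text → Spec_sanitize_dialog_text text (sanitize_dialog_text text)

-- ===== LEMMAS AND PROOFS =====
-- per-character emission of A's mapping stage
def pvEmitA (c : Char) : List Char :=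
  if (decide (c.toNat ≤ 127) && (PySem.Chars.isalnum c || c == ' ')) then [c]
  else if c == '.' then [c]
  else if (c == '!' || c == '?' || c == ',' || c == ':' || c == ';') then
    [if c == '!' || c == '?' then '.' else ' ']
  else if (c == '\n' || c == '\r' || c == '\t' || c == '-' || c == '/' || c == '_') then [' ']
  else if (c == '\'' || c == '"' || c == '`') then []
  else [' ']

-- the same emission phrased with B's three-way classification
def pvEmitM (c : Char) : List Char :=
  if c == '\'' || c == '"' || c == '`' then []
  else
    let c' := if c == '!' || c == '?' then '.' else c
    if c' == '.' || (decide (c'.toNat ≤ 127) && PySem.Chars.isalnum c') then [c']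
    else [' ']

theorem pvStepA_eq (acc : List Char) (c : Char) : pvStepA acc c = acc ++ pvEmitA c := by
  unfold pvStepA pvEmitA
  split_ifs <;> simp

theorem pvFoldA_eq (cs : List Char) : cs.foldl pvStepA [] = cs.flatMap pvEmitA := by
  have h : pvStepA = fun acc c => acc ++ pvEmitA c := by
    funext acc c; exact pvStepA_eq acc c
  rw [h, PySem.List.foldl_append_eq_flatMap]
  simp

set_option maxRecDepth 8192 in
theorem pvEmit_agree_lt (n : Nat) (h : n < 128) : pvEmitA (Char.ofNat n) = pvEmitM (Char.ofNat n) := by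
  revert n h
  decide

theorem pvEmit_agree (c : Char) (h : pvDomChar c = true) : pvEmitA c = pvEmitM c := by
  have hlt : c.toNat < 128 := by
    simp only [pvDomChar, Bool.or_eq_true, Bool.and_eq_true, decide_eq_true_eq, beq_iff_eq] at h
    omega
  have := pvEmit_agree_lt c.toNat hlt
  rwa [Char.ofNat_toNat] at this

set_option maxRecDepth 8192 in
theorem pvAlnum_not_space (n : Nat) (h : n < 128)
    (ha : PySem.Chars.isalnum (Char.ofNat n) = true) :
    PySem.Chars.isspace (Char.ofNat n) = false := by
  revert n h ha
  decide

theorem pvKeep_not_space (c : Char)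
    (h : (c == '.' || (decide (c.toNat ≤ 127) && PySem.Chars.isalnum c)) = true) :
    PySem.Chars.isspace c = false := by
  rcases Bool.or_eq_true .. |>.mp h with h1 | h2
  · have : c = '.' := by simpa using h1
    subst this; decide
  · rcases Bool.and_eq_true .. |>.mp h2 with ⟨hle, ha⟩
    have hlt : c.toNat < 128 := by
      have : c.toNat ≤ 127 := by simpa using hle
      omega
    have := pvAlnum_not_space c.toNat hlt (by rwa [Char.ofNat_toNat])
    rwa [Char.ofNat_toNat] at this

-- the word-builder fold computes exactly split₀.go on B's emitted stream
theorem pvL (cs : List Char) (ws : List String) (cur : List Char) :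
    (let st := cs.foldl pvStepB (ws, cur)
     if !st.2.isEmpty then st.1 ++ [String.ofList st.2] else st.1)
  = (PySem.Chars.split₀.go (cs.flatMap pvEmitM) cur.reverse
      ((ws.map String.toList).reverse)).map String.ofList := by
  induction cs generalizing ws cur with
  | nil =>
    simp only [List.foldl_nil, List.flatMap_nil, PySem.Chars.split₀.go]
    by_cases hc : cur = []
    · subst hc; simp [Function.comp_def]
    · simp [List.isEmpty_eq_false_iff.mpr hc, Function.comp_def]
  | cons c t ih =>
    simp only [List.foldl_cons, List.flatMap_cons]
    by_cases hq : (c == '\'' || c == '"' || c == '`') = true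
    · have hm : pvEmitM c = [] := by simp only [pvEmitM, hq, if_true]
      rw [hm]; simp only [List.nil_append]
      rw [show pvStepB (ws, cur) c = (ws, cur) by simp [pvStepB, hq]]
      exact ih ws cur
    · set c' := if c == '!' || c == '?' then '.' else c with hc'
      by_cases hk : (c' == '.' || (decide (c'.toNat ≤ 127) && PySem.Chars.isalnum c')) = true
      · have hm : pvEmitM c = [c'] := by
          simp only [pvEmitM, hq, if_false]; rw [← hc']; simp [hk]
        have hs : pvStepB (ws, cur) c = (ws, cur ++ [c']) := by
          simp only [pvStepB, hq, if_false]; rw [← hc']; simp [hk]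
        rw [hm, hs, List.cons_append, List.nil_append,
          PySem.Chars.split₀.go, pvKeep_not_space c' hk]
        simp only [Bool.false_eq_true, if_false]
        have := ih ws (cur ++ [c'])
        simpa [List.reverse_append] using this
      · have hm : pvEmitM c = [' '] := by
          simp only [pvEmitM, hq, if_false]; rw [← hc']; simp [hk]
        rw [hm, List.cons_append, List.nil_append, PySem.Chars.split₀.go]
        simp only [show PySem.Chars.isspace ' ' = true from by decide, if_true]
        by_cases hcur : cur = []
        · subst hcur
          have hs : pvStepB (ws, []) c = (ws, []) := by
            simp only [pvStepB, hq, if_false]; rw [← hc']; simp [hk]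
          rw [hs]; simpa using ih ws []
        · have hs : pvStepB (ws, cur) c = (ws ++ [String.ofList cur], []) := by
            simp only [pvStepB, hq, if_false]; rw [← hc']
            simp [hk, List.isEmpty_eq_false_iff.mpr hcur]
          rw [hs]
          have := ih (ws ++ [String.ofList cur]) []
          simpa [hcur] using this

-- ===== VERDICT (by name: the statement is the Claim_ definition above) =====
theorem sanitize_dialog_text_spec : Claim_equal_sanitize_dialog_text := by
  intro text hdom
  unfold Spec_sanitize_dialog_text
  have hflat : text.toList.flatMap pvEmitA = text.toList.flatMap pvEmitM := by
    apply List.flatMap_congr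
    intro c hc
    exact pvEmit_agree c (by
      have : text.toList.all pvDomChar = true := hdom
      exact List.all_eq_true.mp this c hc)
  have hL := pvL text.toList [] []
  simp only [List.map_nil, List.reverse_nil] at hL
  have hA : sanitize_dialog_text text
      = PySem.Str.join " "
          ((PySem.Chars.split₀.go (text.toList.flatMap pvEmitM) [] []).map String.ofList) := by
    show PySem.Str.join " " (PySem.Str.split₀ (String.ofList (text.toList.foldl pvStepA []))) = _
    rw [pvFoldA_eq, hflat]
    simp [PySem.Str.split₀, PySem.Chars.split₀]
  have hB : sanitize_dialog_text_alt text
      = PySem.Str.join " "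
          ((PySem.Chars.split₀.go (text.toList.flatMap pvEmitM) [] []).map String.ofList) := by
    show PySem.Str.join " "
        (let st := text.toList.foldl pvStepB ([], [])
         if !st.2.isEmpty then st.1 ++ [String.ofList st.2] else st.1) = _
    exact congrArg (PySem.Str.join " ") hL
  rw [hA, hB]
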